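-- pv_equiv track=rewrite | github.com/emiliakochutek/university-courses | python_course/lab2/lab2-4.py | szyfruj
-- ===== SOURCE A (Python) =====
-- def szyfruj(tekst, klucz = 'malinowebuty'):
--     if (len(klucz) % 2) != 0 or len(set(klucz)) != len(klucz):
--         raise ValueError('nieprawidłowy klucz!')
--     KLUCZ = {}
--     for znak in klucz:
--         if (klucz.index(znak) % 2) == 0:
--             KLUCZ[znak] = klucz[klucz.index(znak) + 1]
--         else:
--             KLUCZ[znak] = klucz[klucz.index(znak) - 1]
--     zaszyfrowany = ''
--     for litera in tekst:
--         if litera in KLUCZ: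
--             zaszyfrowany += KLUCZ[litera]
--         else:
--             zaszyfrowany += litera
--     return zaszyfrowany
-- ===== SOURCE B (Python) =====
-- def szyfruj(tekst, klucz = 'malinowebuty'):
--     if (len(klucz) % 2) != 0 or len(set(klucz)) != len(klucz):
--         raise ValueError('nieprawidłowy klucz!')
--     # no table: translate each letter directly via its partner position in the key
--     wynik = []
--     for litera in tekst:
--         i = klucz.find(litera)
--         if i >= 0:
--             wynik.append(klucz[i + 1 - 2 * (i % 2)])
--         else:
--             wynik.append(litera)
--     return ''.join(wynik)
-- ===== Notes on version B (the rewrite author's own statement) =====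
-- stated objective: simpler
-- what changed: B builds no substitution dict at all: it translates each letter directly by locating it in the key with find and taking the partner character at the branch-free index i + 1 - 2*(i % 2), instead of A's per-character table build with repeated .index calls and a parity branch.
import Mathlib
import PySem

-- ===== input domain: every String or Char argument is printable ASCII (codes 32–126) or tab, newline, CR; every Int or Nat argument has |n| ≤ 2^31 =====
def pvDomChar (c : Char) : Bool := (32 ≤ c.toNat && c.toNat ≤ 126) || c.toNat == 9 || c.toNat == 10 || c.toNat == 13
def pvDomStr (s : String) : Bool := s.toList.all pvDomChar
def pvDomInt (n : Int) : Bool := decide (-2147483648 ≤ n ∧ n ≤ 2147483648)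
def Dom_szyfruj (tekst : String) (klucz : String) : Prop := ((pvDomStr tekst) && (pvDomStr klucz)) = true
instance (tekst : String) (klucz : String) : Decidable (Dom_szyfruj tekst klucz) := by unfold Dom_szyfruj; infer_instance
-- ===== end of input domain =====

-- B replaces A's dict-building parity/index scan by direct per-letter partner lookup (klucz[i + 1 - 2*(i%2)]), no table at all: simpler, one decomposition fewer.


-- ===== PORT A =====
-- value stored for znak: klucz[klucz.index(znak) ± 1] depending on parity of the index
-- (the .getD znak default is never reached inside Pre_: the index ±1 is always in range there)
def szyfrujVal (kl : List Char) (znak : Char) : Char :=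
  match PySem.List.index? kl znak with
  | some i =>
      if i % 2 = 0 then (PySem.List.pyGet? kl ((i : Int) + 1)).getD znak
      else (PySem.List.pyGet? kl ((i : Int) - 1)).getD znak
  | none => znak

def szyfruj (tekst : String) (klucz : String) : String :=
  let kl := klucz.toList
  if kl.length % 2 ≠ 0 ∨ (PySem.Set.ofList kl).length ≠ kl.length then ""  -- Python: raise ValueError (outside Pre_)
  else
    let KLUCZ : PySem.Dict Char Char :=
      kl.foldl (fun d znak => d.insert znak (szyfrujVal kl znak)) PySem.Dict.empty
    String.ofList (tekst.toList.foldl (fun acc litera =>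
      acc ++ [match KLUCZ.get? litera with
              | some c => c           -- litera in KLUCZ
              | none => litera]) [])

-- ===== PORT B =====
def szyfruj_alt (tekst : String) (klucz : String) : String :=
  let kl := klucz.toList
  if kl.length % 2 ≠ 0 ∨ (PySem.Set.ofList kl).length ≠ kl.length then ""  -- Python: raise ValueError (outside Pre_)
  else
    String.ofList (tekst.toList.foldl (fun acc litera =>
      acc ++ [match PySem.List.index? kl litera with   -- klucz.find(litera): some i ↔ i >= 0
              | some i => (PySem.List.pyGet? kl ((i : Int) + 1 - 2 * ((i : Int) % 2))).getD litera
              | none => litera]) [])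

-- ===== PRECONDITION & SPEC =====
-- Pre_ excludes exactly the keys on which Python A raises ValueError: odd length or repeated characters.
def Pre_szyfruj (tekst : String) (klucz : String) : Prop :=
  klucz.toList.length % 2 = 0 ∧ (PySem.Set.ofList klucz.toList).length = klucz.toList.length
instance (tekst : String) (klucz : String) : Decidable (Pre_szyfruj tekst klucz) := by
  unfold Pre_szyfruj; infer_instance

def pvWitness_szyfruj : String × String := ("ala ma kota", "malinowebuty")

def Spec_szyfruj (tekst : String) (klucz : String) (out : String) : Prop := out = szyfruj_alt tekst klucz
instance (tekst : String) (klucz : String) (out : String) : Decidable (Spec_szyfruj tekst klucz out) := by unfold Spec_szyfruj; infer_instance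

-- ===== CLAIM (what is proved, stated in full; the proofs are below) =====
def Claim_equal_szyfruj : Prop := ∀ (tekst : String) (klucz : String), Dom_szyfruj tekst klucz → Pre_szyfruj tekst klucz → Spec_szyfruj tekst klucz (szyfruj tekst klucz)

-- ===== LEMMAS AND PROOFS =====

-- the dict A builds maps c ∈ kl to szyfrujVal kl c (the stored value depends only on c and kl, so overwrites are harmless)
theorem get?_foldl_insert_val (kl s : List Char) (d : PySem.Dict Char Char) (c : Char) :
    (s.foldl (fun d znak => d.insert znak (szyfrujVal kl znak)) d).get? c
      = if c ∈ s then some (szyfrujVal kl c) else d.get? c := by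
  induction s generalizing d with
  | nil => simp
  | cons a s ih =>
      simp only [List.foldl_cons, ih, PySem.Dict.get?_insert, List.mem_cons]
      by_cases hs : c ∈ s
      · simp [hs]
      · by_cases hca : c = a
        · subst hca; simp [hs]
        · simp [hs, hca]

-- the per-letter translation functions of the two ports agree
theorem val_eq (kl : List Char) (c : Char) :
    (match PySem.List.index? kl c with
     | some i => (PySem.List.pyGet? kl ((i : Int) + 1 - 2 * ((i : Int) % 2))).getD c
     | none => c) = szyfrujVal kl c := by
  unfold szyfrujVal
  cases h : PySem.List.index? kl c with
  | none => rfl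
  | some i =>
      simp only []
      by_cases hp : i % 2 = 0
      · have : (i : Int) + 1 - 2 * ((i : Int) % 2) = (i : Int) + 1 := by omega
        rw [this, if_pos hp]
      · have h1 : i % 2 = 1 := Nat.mod_two_eq_zero_or_one i |>.resolve_left hp
        have : (i : Int) + 1 - 2 * ((i : Int) % 2) = (i : Int) - 1 := by omega
        rw [this, if_neg hp]

-- ===== VERDICT (by name: the statement is the Claim_ definition above) =====
theorem szyfruj_spec : Claim_equal_szyfruj := by
  intro tekst klucz _ _
  unfold Spec_szyfruj szyfruj szyfruj_alt
  simp only []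
  by_cases hif : klucz.toList.length % 2 ≠ 0 ∨ (PySem.Set.ofList klucz.toList).length ≠ klucz.toList.length
  · rw [if_pos hif, if_pos hif]
  · rw [if_neg hif, if_neg hif]
    congr 1
    apply PySem.List.foldl_congr_mem
    intro acc litera _
    congr 1
    rw [get?_foldl_insert_val, ← val_eq]
    cases h : PySem.List.index? klucz.toList litera with
    | none =>
        have : litera ∉ klucz.toList := (PySem.List.index?_eq_none_iff _ _).mp h
        simp [this]
    | some i =>
        have : litera ∈ klucz.toList := by
          rw [← PySem.List.index?_isSome_iff, h]; rfl
        simp [this]
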